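-- pv_equiv track=rewrite | github.com/lun-ai/sequential-teaching | data/scripts/sort_algorithms.py | ds_back
-- ===== SOURCE A (Python) =====
-- def ds_back(x, partial):
--     '''
--         Applies dictionary sort by prioritising comparison from x with the last element of the partially sorted list
--
--         Tested
--
--         PARAMETERS
--         ----------
--         x : list
--         partial: list
--
--         RETURNS
--         -------
--         list : [sorted list, comps, compsN]
--     '''
--
--     result = partial
--     comps = []
--     compsN = 0
--
--     for n in x:
--         if result == []:
--             result.append(n)
--             continue
--         i = 0
--         j = len(result) - 1
--         if n > result[j]:
--             comps.append([n, result[j]])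
--             compsN += 1
--             result.insert(j + 1, n)
--         elif n < result[i]:
--             comps.append([n, result[i]])
--             compsN += 1
--             result.insert(i, n)
--         else:
--             comps.append([n, result[j]])
--             comps.append([n, result[i]])
--             compsN += 2
--             while i < j:
--                 k = (i + j) // 2
--                 if n < result[k]:
--                     comps.append([n, result[k]])
--                     compsN += 1
--                     j = k
--                 else:
--                     comps.append([n, result[k]])
--                     compsN += 1
--                     i = k
--                 if i >= j - 1:
--                     result.insert(j, n)
--                     break
--
--     return result, comps, compsN
-- ===== SOURCE B (Python) =====
-- def _bin(result, n, i, j):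
--     # returns (insert position, values compared), for result[i] <= n <= result[j]
--     if i >= j:
--         return j, []
--     k = (i + j) // 2
--     if n < result[k]:
--         if i >= k - 1:
--             return k, [result[k]]
--         p, vs = _bin(result, n, i, k)
--         return p, [result[k]] + vs
--     else:
--         if k >= j - 1:
--             return j, [result[k]]
--         p, vs = _bin(result, n, k, j)
--         return p, [result[k]] + vs
--
--
-- def ds_back(x, partial):
--     result = partial
--     comps = []
--     for n in x:
--         m = len(result)
--         if m == 0:
--             result.append(n)
--             continue
--         if n > result[m - 1]:
--             pos, vals = m, [result[m - 1]]
--         elif n < result[0]: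
--             pos, vals = 0, [result[0]]
--         else:
--             p, vs = _bin(result, n, 0, m - 1)
--             pos, vals = p, [result[m - 1], result[0]] + vs
--         comps.extend([n, v] for v in vals)
--         result.insert(pos, n)
--     return result, comps, len(comps)
-- ===== Notes on version B (the rewrite author's own statement) =====
-- stated objective: alternative
-- what changed: The imperative while-loop with break and a running counter is replaced by a pure recursive binary-search helper returning (insert position, compared values); the comparison log is derived from those values by one map/extend and compsN is taken as len(comps) at the end.
-- intended difference: When the working list is a single element v and the incoming element equals v (partial=[v] with x starting with v, or partial=[] with x[1]==x[0]), A logs two comparisons but silently drops the element from the sorted result, while B inserts it; for a sort, keeping the element is the intended behaviour. — e.g. on ds_back([5], [5]): A returns ([5], [[5, 5], [5, 5]], 2), B returns ([5, 5], [[5, 5], [5, 5]], 2)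
import Mathlib
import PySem

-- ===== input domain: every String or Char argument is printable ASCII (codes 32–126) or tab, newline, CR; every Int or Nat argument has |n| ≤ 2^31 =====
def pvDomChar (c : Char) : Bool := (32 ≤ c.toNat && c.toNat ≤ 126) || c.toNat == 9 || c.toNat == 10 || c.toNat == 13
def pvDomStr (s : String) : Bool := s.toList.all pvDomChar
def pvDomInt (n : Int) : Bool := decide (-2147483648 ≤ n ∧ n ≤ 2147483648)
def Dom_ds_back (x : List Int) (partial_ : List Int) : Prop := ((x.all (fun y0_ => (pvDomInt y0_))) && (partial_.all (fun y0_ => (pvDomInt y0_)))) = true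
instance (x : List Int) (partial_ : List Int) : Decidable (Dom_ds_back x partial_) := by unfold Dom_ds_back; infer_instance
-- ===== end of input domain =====

-- B re-implements A as a recursive binary-search helper returning (position, compared values),
-- with the comparison log derived from it and compsN taken as len(comps); B inserts the element
-- in the length-1/equal corner where A silently drops it (see D_ds_back).
-- Both Pythons return `partial` itself (mutated in place); the equivalence here is about the return value.

-- ===== PORT A =====
-- midpoint bounds used by the termination proofs of both ports
theorem pvMid_lt {i j : Int} (h : i < j) : PySem.Int.floordiv (i + j) 2 < j := by
  have := (PySem.Int.floordiv_lt_iff_lt_mul (a := i + j) (b := 2) (q := j) (by omega)).2 (by omega)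
  exact this

theorem pvMid_gt {i j : Int} (h : i + 2 ≤ j) : i < PySem.Int.floordiv (i + j) 2 := by
  have := (PySem.Int.le_floordiv_iff_mul_le (a := i + j) (b := 2) (q := i + 1) (by omega)).2 (by omega)
  omega

theorem pvMid_ge {i j : Int} (h : i ≤ j) : i ≤ PySem.Int.floordiv (i + j) 2 :=
  (PySem.Int.floordiv_two_mid_bounds h).1

-- while-loop of A (entered with i, j; appends to comps and inserts into result; if the loop
-- guard fails at entry, A returns with the element n dropped)
def dsWhile (n : Int) (result : List Int) (comps : List (List Int)) (compsN : Int)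
    (i j : Int) : List Int × List (List Int) × Int :=
  if h : i < j then
    let k := PySem.Int.floordiv (i + j) 2
    let rk := PySem.List.pyGetD result k 0   -- result[k]; index provably in range on A's calls
    if n < rk then
      -- comps.append([n, result[k]]); compsN += 1; j = k
      if i ≥ k - 1 then (PySem.List.insert result k n, comps ++ [[n, rk]], compsN + 1)
      else dsWhile n result (comps ++ [[n, rk]]) (compsN + 1) i k
    else
      -- comps.append([n, result[k]]); compsN += 1; i = k
      if k ≥ j - 1 then (PySem.List.insert result j n, comps ++ [[n, rk]], compsN + 1)
      else dsWhile n result (comps ++ [[n, rk]]) (compsN + 1) k j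
  else (result, comps, compsN)
termination_by (j - i).toNat
decreasing_by
  · have h1 := pvMid_ge h.le
    have h2 := pvMid_lt h
    omega
  · have h2 := pvMid_lt h
    have h3 : i + 2 ≤ j := by
      have := pvMid_ge h.le
      omega
    have := pvMid_gt h3
    omega

-- body of A's `for n in x` loop over the state (result, comps, compsN)
def dsStep (st : List Int × List (List Int) × Int) (n : Int) :
    List Int × List (List Int) × Int :=
  let result := st.1
  let comps := st.2.1
  let compsN := st.2.2
  if result = [] then (result ++ [n], comps, compsN)
  else
    let i : Int := 0
    let j : Int := (result.length : Int) - 1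
    let rj := PySem.List.pyGetD result j 0
    let ri := PySem.List.pyGetD result i 0
    if n > rj then
      (PySem.List.insert result (j + 1) n, comps ++ [[n, rj]], compsN + 1)
    else if n < ri then
      (PySem.List.insert result i n, comps ++ [[n, ri]], compsN + 1)
    else
      dsWhile n result (comps ++ [[n, rj], [n, ri]]) (compsN + 2) i j

def ds_back (x : List Int) (partial_ : List Int) : List Int × List (List Int) × Int :=
  x.foldl dsStep (partial_, [], 0)

-- ===== PORT B =====
-- recursive binary search: returns (insert position, values compared), for result[i] <= n <= result[j]
def binAlt (result : List Int) (n : Int) (i j : Int) : Int × List Int :=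
  if h : i < j then
    let k := PySem.Int.floordiv (i + j) 2
    let rk := PySem.List.pyGetD result k 0
    if n < rk then
      if i ≥ k - 1 then (k, [rk])
      else
        let r := binAlt result n i k
        (r.1, rk :: r.2)
    else
      if k ≥ j - 1 then (j, [rk])
      else
        let r := binAlt result n k j
        (r.1, rk :: r.2)
  else (j, [])
termination_by (j - i).toNat
decreasing_by
  · have h1 := pvMid_ge h.le
    have h2 := pvMid_lt h
    omega
  · have h2 := pvMid_lt h
    have h3 : i + 2 ≤ j := by
      have := pvMid_ge h.le
      omega
    have := pvMid_gt h3
    omega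

-- body of B's loop over the state (result, comps)
def altStep (st : List Int × List (List Int)) (n : Int) : List Int × List (List Int) :=
  let result := st.1
  let comps := st.2
  let m := result.length
  if m = 0 then (result ++ [n], comps)
  else
    let last := PySem.List.pyGetD result ((m : Int) - 1) 0
    let first := PySem.List.pyGetD result 0 0
    let pv : Int × List Int :=
      if n > last then ((m : Int), [last])
      else if n < first then (0, [first])
      else
        let r := binAlt result n 0 ((m : Int) - 1)
        (r.1, last :: first :: r.2)
    (PySem.List.insert result pv.1 n, comps ++ pv.2.map (fun v => [n, v]))

def ds_back_alt (x : List Int) (partial_ : List Int) : List Int × List (List Int) × Int :=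
  let st := x.foldl altStep (partial_, [])
  (st.1, st.2, (st.2.length : Int))

-- ===== PRECONDITION & SPEC =====
-- When the working list has exactly one element v and the incoming element equals it, A's
-- binary-search loop is never entered and the element is silently dropped from the result
-- (though two comparisons are logged); B inserts it. D_ is exactly the inputs that reach
-- that configuration: partial = [v] with x starting with v, or partial = [] with x's second
-- element equal to its first.
def D_ds_back (x : List Int) (partial_ : List Int) : Prop :=
  (partial_.length = 1 ∧ x ≠ [] ∧ x.head? = partial_.head?) ∨
  (partial_ = [] ∧ 2 ≤ x.length ∧ (x.drop 1).head? = x.head?)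
instance (x : List Int) (partial_ : List Int) : Decidable (D_ds_back x partial_) := by
  unfold D_ds_back; infer_instance

def Spec_ds_back (x : List Int) (partial_ : List Int) (out : List Int × List (List Int) × Int) : Prop := ¬ D_ds_back x partial_ → out = ds_back_alt x partial_
instance (x : List Int) (partial_ : List Int) (out : List Int × List (List Int) × Int) : Decidable (Spec_ds_back x partial_ out) := by unfold Spec_ds_back; infer_instance

def pvDiffWitness_ds_back : List Int × List Int := ([5], [5])
def pvDiffWitnessOut_ds_back : (List Int × List (List Int) × Int) × (List Int × List (List Int) × Int) :=
  (([5], [[5, 5], [5, 5]], 2), ([5, 5], [[5, 5], [5, 5]], 2))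

-- ===== CLAIM (what is proved, stated in full; the proofs are below) =====
def Claim_unchanged_ds_back : Prop := ∀ (x : List Int) (partial_ : List Int), Dom_ds_back x partial_ → Spec_ds_back x partial_ (ds_back x partial_)
def Claim_changed_ds_back : Prop := Dom_ds_back (pvDiffWitness_ds_back.1) (pvDiffWitness_ds_back.2) ∧ D_ds_back (pvDiffWitness_ds_back.1) (pvDiffWitness_ds_back.2) ∧ ds_back (pvDiffWitness_ds_back.1) (pvDiffWitness_ds_back.2) = pvDiffWitnessOut_ds_back.1 ∧ ds_back_alt (pvDiffWitness_ds_back.1) (pvDiffWitness_ds_back.2) = pvDiffWitnessOut_ds_back.2 ∧ pvDiffWitnessOut_ds_back.1 ≠ pvDiffWitnessOut_ds_back.2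
def Claim_exact_ds_back : Prop := ∀ (x : List Int) (partial_ : List Int), Dom_ds_back x partial_ → D_ds_back x partial_ → ds_back x partial_ ≠ ds_back_alt x partial_

-- ===== LEMMAS AND PROOFS =====

-- A's while loop computes exactly B's recursive search result
theorem dsWhile_eq_binAlt (n : Int) : ∀ (fuel : Nat) (result : List Int) (i j : Int)
    (comps : List (List Int)) (compsN : Int), (j - i).toNat ≤ fuel → i < j →
    dsWhile n result comps compsN i j =
      (PySem.List.insert result (binAlt result n i j).1 n,
       comps ++ (binAlt result n i j).2.map (fun v => [n, v]),
       compsN + (binAlt result n i j).2.length) := by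
  intro fuel
  induction fuel with
  | zero => intro result i j comps compsN hf h; omega
  | succ f ih =>
    intro result i j comps compsN hf h
    rw [dsWhile, binAlt]
    simp only [dif_pos h]
    have h1 := pvMid_ge h.le
    have h2 := pvMid_lt h
    set k := PySem.Int.floordiv (i + j) 2 with hk
    by_cases hlt : n < PySem.List.pyGetD result k 0
    · simp only [if_pos hlt]
      by_cases hbr : i ≥ k - 1
      · simp only [if_pos hbr]
        simp
      · simp only [if_neg hbr]
        rw [ih result i k (comps ++ [[n, PySem.List.pyGetD result k 0]]) (compsN + 1)
          (by omega) (by omega)]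
        simp [List.append_assoc]
        omega
    · simp only [if_neg hlt]
      by_cases hbr : k ≥ j - 1
      · simp only [if_pos hbr]
        simp
      · simp only [if_neg hbr]
        have h3 : i + 2 ≤ j := by omega
        have h4 := pvMid_gt h3
        rw [ih result k j (comps ++ [[n, PySem.List.pyGetD result k 0]]) (compsN + 1)
          (by omega) (by omega)]
        simp [List.append_assoc]
        omega

-- B's step always grows the result by one element
theorem altStep_len (res : List Int) (comps : List (List Int)) (n : Int) :
    ((altStep (res, comps) n).1).length = res.length + 1 := by
  unfold altStep
  by_cases h0 : res.length = 0
  · simp [h0]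
  · simp only [if_neg h0]
    simp [PySem.List.length_insert]

-- the two step functions agree whenever the degenerate configuration (singleton result
-- equal to the incoming element) does not occur
theorem step_eq (res : List Int) (comps : List (List Int)) (n : Int)
    (h : ¬(res.length = 1 ∧ n = PySem.List.pyGetD res 0 0)) :
    dsStep (res, comps, (comps.length : Int)) n =
      ((altStep (res, comps) n).1, (altStep (res, comps) n).2,
        ((altStep (res, comps) n).2.length : Int)) := by
  unfold dsStep altStep
  by_cases h0 : res = []
  · simp [h0]
  · have hlen : res.length ≠ 0 := by simpa using h0
    simp only [if_neg h0, if_neg hlen]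
    by_cases hgt : n > PySem.List.pyGetD res ((res.length : Int) - 1) 0
    · simp only [if_pos hgt]
      simp
    · simp only [if_neg hgt]
      by_cases hlt : n < PySem.List.pyGetD res 0 0
      · simp only [if_pos hlt]
        simp
      · simp only [if_neg hlt]
        have h2 : 2 ≤ res.length := by
          rcases Nat.lt_or_ge res.length 2 with hl | hl
          · exfalso
            have hh : res.length = 1 := by omega
            obtain ⟨a, ha⟩ := List.length_eq_one_iff.mp hh
            subst ha
            apply h
            refine ⟨rfl, ?_⟩
            simp [PySem.List.pyGetD] at hgt hlt ⊢
            omega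
          · exact hl
        have hij : (0 : Int) < (res.length : Int) - 1 := by
          have : (2 : Int) ≤ (res.length : Int) := by exact_mod_cast h2
          omega
        rw [dsWhile_eq_binAlt n ((((res.length : Int) - 1) - 0).toNat) res 0
          ((res.length : Int) - 1) _ _ (le_refl _) hij]
        simp [List.append_assoc]
        ring

-- folding the two step functions from equal states with result length ≥ 2 stays equal
theorem fold_eq : ∀ (x : List Int) (res : List Int) (comps : List (List Int)),
    2 ≤ res.length →
    x.foldl dsStep (res, comps, (comps.length : Int)) =
      ((x.foldl altStep (res, comps)).1, (x.foldl altStep (res, comps)).2,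
        ((x.foldl altStep (res, comps)).2.length : Int)) := by
  intro x
  induction x with
  | nil => intro res comps h; rfl
  | cons n t ih =>
    intro res comps h
    have hnd : ¬(res.length = 1 ∧ n = PySem.List.pyGetD res 0 0) := by omega
    simp only [List.foldl_cons]
    rw [step_eq res comps n hnd]
    have hl : 2 ≤ ((altStep (res, comps) n).1).length := by
      rw [altStep_len]; omega
    have := ih (altStep (res, comps) n).1 (altStep (res, comps) n).2 hl
    simpa using this

-- final result length under B's fold
theorem fold_alt_len : ∀ (x : List Int) (res : List Int) (comps : List (List Int)),
    ((x.foldl altStep (res, comps)).1).length = res.length + x.length := by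
  intro x
  induction x with
  | nil => intro res comps; rfl
  | cons n t ih =>
    intro res comps
    simp only [List.foldl_cons]
    rcases hst : altStep (res, comps) n with ⟨r', c'⟩
    have := altStep_len res comps n
    rw [hst] at this
    simp only at this
    rw [ih r' c', this]
    simp
    omega

-- A's while loop grows the result by at most one
theorem dsWhile_len_le (n : Int) : ∀ (fuel : Nat) (result : List Int) (i j : Int)
    (comps : List (List Int)) (compsN : Int), (j - i).toNat ≤ fuel →
    ((dsWhile n result comps compsN i j).1).length ≤ result.length + 1 := by
  intro fuel
  induction fuel with
  | zero =>
    intro result i j comps compsN hf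
    rw [dsWhile]
    have : ¬ i < j := by omega
    simp [this]
  | succ f ih =>
    intro result i j comps compsN hf
    rw [dsWhile]
    by_cases h : i < j
    · simp only [dif_pos h]
      have h1 := pvMid_ge h.le
      have h2 := pvMid_lt h
      by_cases hlt : n < PySem.List.pyGetD result (PySem.Int.floordiv (i + j) 2) 0
      · simp only [if_pos hlt]
        by_cases hbr : i ≥ PySem.Int.floordiv (i + j) 2 - 1
        · simp only [if_pos hbr]
          simp [PySem.List.length_insert]
        · simp only [if_neg hbr]
          exact ih result i _ _ _ (by omega)
      · simp only [if_neg hlt]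
        by_cases hbr : PySem.Int.floordiv (i + j) 2 ≥ j - 1
        · simp only [if_pos hbr]
          simp [PySem.List.length_insert]
        · simp only [if_neg hbr]
          have h3 : i + 2 ≤ j := by omega
          have h4 := pvMid_gt h3
          exact ih result _ j _ _ (by omega)
    · simp [dif_neg h]

-- A's step grows the result by at most one
theorem dsStep_len_le (st : List Int × List (List Int) × Int) (n : Int) :
    ((dsStep st n).1).length ≤ st.1.length + 1 := by
  rcases st with ⟨res, comps, compsN⟩
  unfold dsStep
  by_cases h0 : res = []
  · simp [h0]
  · simp only [if_neg h0]
    by_cases hgt : n > PySem.List.pyGetD res ((res.length : Int) - 1) 0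
    · simp [if_pos hgt, PySem.List.length_insert]
    · simp only [if_neg hgt]
      by_cases hlt : n < PySem.List.pyGetD res 0 0
      · simp [if_pos hlt, PySem.List.length_insert]
      · simp only [if_neg hlt]
        exact dsWhile_len_le n _ res 0 _ _ _ (le_refl _)

-- A's fold grows the result by at most the number of elements
theorem fold_ds_len_le : ∀ (x : List Int) (st : List Int × List (List Int) × Int),
    ((x.foldl dsStep st).1).length ≤ st.1.length + x.length := by
  intro x
  induction x with
  | nil => intro st; simp
  | cons n t ih =>
    intro st
    simp only [List.foldl_cons]
    have h1 := ih (dsStep st n)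
    have h2 := dsStep_len_le st n
    simp at h1 ⊢
    omega

-- the degenerate step: singleton result equal to n logs two comparisons and drops n
theorem dsStep_drop (v : Int) (comps : List (List Int)) (compsN : Int) :
    dsStep ([v], comps, compsN) v = ([v], comps ++ [[v, v], [v, v]], compsN + 2) := by
  unfold dsStep
  simp [dsWhile]

-- ===== VERDICT (by name: the statement is the Claim_ definition above) =====
theorem ds_back_spec : Claim_unchanged_ds_back := by
  unfold Claim_unchanged_ds_back
  intro x partial_ _ hnD
  unfold ds_back ds_back_alt
  rcases x with _ | ⟨n, t⟩
  · rfl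
  · rcases partial_ with _ | ⟨v, p⟩
    · -- partial = []: first step appends n
      simp only [List.foldl_cons]
      have h1 : dsStep ([], [], 0) n = ([n], [], 0) := by unfold dsStep; simp
      have h2 : altStep ([], []) n = ([n], []) := by unfold altStep; simp
      rw [h1, h2]
      rcases t with _ | ⟨m, t'⟩
      · rfl
      · -- second element m ≠ n by ¬D
        have hmn : m ≠ n := by
          intro hh
          exact hnD (Or.inr ⟨rfl, by simp, by simp [hh]⟩)
        simp only [List.foldl_cons]
        have hnd : ¬(([n] : List Int).length = 1 ∧ m = PySem.List.pyGetD [n] 0 0) := by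
          rintro ⟨-, hEq⟩
          rw [PySem.List.pyGetD_zero_cons] at hEq
          exact hmn hEq
        have h3 : dsStep ([n], [], 0) m =
            ((altStep ([n], []) m).1, (altStep ([n], []) m).2,
              ((altStep ([n], []) m).2.length : Int)) := by
          have := step_eq [n] [] m hnd
          simpa using this
        rw [h3]
        have hl : 2 ≤ ((altStep ([n], []) m).1).length := by rw [altStep_len]; norm_num
        exact fold_eq t' _ _ hl
    · rcases p with _ | ⟨w, p'⟩
      · -- partial = [v], first x element n ≠ v by ¬D
        have hnv : n ≠ v := by
          intro hh
          exact hnD (Or.inl ⟨by simp, by simp, by simp [hh]⟩)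
        simp only [List.foldl_cons]
        have hnd : ¬(([v] : List Int).length = 1 ∧ n = PySem.List.pyGetD [v] 0 0) := by
          rintro ⟨-, hEq⟩
          rw [PySem.List.pyGetD_zero_cons] at hEq
          exact hnv hEq
        have h3 : dsStep ([v], [], 0) n =
            ((altStep ([v], []) n).1, (altStep ([v], []) n).2,
              ((altStep ([v], []) n).2.length : Int)) := by
          have := step_eq [v] [] n hnd
          simpa using this
        rw [h3]
        have hl : 2 ≤ ((altStep ([v], []) n).1).length := by rw [altStep_len]; norm_num
        exact fold_eq t _ _ hl
      · -- partial length ≥ 2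
        have := fold_eq (n :: t) (v :: w :: p') [] (by simp)
        simpa using this

theorem ds_back_changed : Claim_changed_ds_back := by
  unfold Claim_changed_ds_back
  refine ⟨by decide, by decide, ?_, ?_, by decide⟩
  · show ds_back [5] [5] = ([5], [[5, 5], [5, 5]], 2)
    unfold ds_back
    simp only [List.foldl_cons, List.foldl_nil]
    rw [show dsStep ([5], [], 0) 5 = ([5], [[5,5],[5,5]], 0 + 2) from dsStep_drop 5 [] 0]
    norm_num
  · show ds_back_alt [5] [5] = ([5, 5], [[5, 5], [5, 5]], 2)
    unfold ds_back_alt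
    simp only [List.foldl_cons, List.foldl_nil]
    rw [altStep]
    norm_num
    rw [binAlt]
    decide

theorem ds_back_tight : Claim_exact_ds_back := by
  unfold Claim_exact_ds_back
  intro x partial_ _ hD heq
  have hlen : ((ds_back x partial_).1).length = ((ds_back_alt x partial_).1).length := by
    rw [heq]
  have hB : ((ds_back_alt x partial_).1).length = partial_.length + x.length := by
    unfold ds_back_alt
    simpa using fold_alt_len x partial_ []
  have hA : ((ds_back x partial_).1).length < partial_.length + x.length := by
    unfold ds_back
    rcases hD with ⟨hp1, hx, hh⟩ | ⟨hp0, hx2, hh⟩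
    · rcases partial_ with _ | ⟨v, p⟩
      · simp at hp1
      · rcases p with _ | ⟨w, p'⟩
        · rcases x with _ | ⟨n, t⟩
          · simp at hx
          · have hnv : n = v := by simpa using hh
            subst hnv
            simp only [List.foldl_cons]
            rw [dsStep_drop]
            have := fold_ds_len_le t ([n], [[n, n], [n, n]], 0 + 2)
            simp at this ⊢
            omega
        · simp at hp1
    · subst hp0
      rcases x with _ | ⟨a, t⟩
      · simp at hx2
      · rcases t with _ | ⟨b, t'⟩
        · simp at hx2
        · have hba : b = a := by simpa using hh
          subst hba
          simp only [List.foldl_cons]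
          have h1 : dsStep (([] : List Int), ([] : List (List Int)), (0 : Int)) b = ([b], [], 0) := by
            unfold dsStep; simp
          rw [h1, dsStep_drop]
          have := fold_ds_len_le t' ([b], [[b, b], [b, b]], 0 + 2)
          simp at this ⊢
          omega
  omega
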